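-- pv_equiv track=rewrite | github.com/DWL21/python-algorithms-solved | baekjoon/class4/2638.py | count_airs
-- ===== SOURCE A (Python) =====
-- board = []
--
-- dx = [0, 0, 1, -1]
--
-- dy = [1, -1, 0, 0]
--
-- def count_airs(board, visited):
--     N = len(board)
--     M = len(board[0])
--     board_counting = [[0] * M for _ in range(N)]
--     for i in range(N):
--         for j in range(M):
--             if not visited[i][j] or board[i][j]:
--                 continue
--             for k in range(4):
--                 new_x = i + dx[k]
--                 new_y = j + dy[k]
--                 if new_x < 0 or new_x >= N or new_y < 0 or new_y >= M:
--                     continue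
--                 board_counting[new_x][new_y] += 1
--     return board_counting
-- ===== SOURCE B (Python) =====
-- dx = [0, 0, 1, -1]
--
-- dy = [1, -1, 0, 0]
--
-- def count_airs(board, visited):
--     N = len(board)
--     M = len(board[0])
--     # pass 1: a 0/1 mask of visited-air cells
--     mask = [[1 if visited[i][j] and not board[i][j] else 0 for j in range(M)]
--             for i in range(N)]
--     zero = [0] * M
--     # pass 2: each output row is the sum of the mask row above, the mask row
--     # below, and the current mask row shifted left and right
--     result = []
--     for i in range(N):
--         up = mask[i - 1] if i > 0 else zero
--         down = mask[i + 1] if i + 1 < N else zero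
--         cur = mask[i]
--         left = [0] + cur[:-1]
--         right = cur[1:] + [0]
--         result.append([up[j] + down[j] + left[j] + right[j] for j in range(M)])
--     return result
-- ===== Notes on version B (the rewrite author's own statement) =====
-- stated objective: alternative
-- what changed: Replaced the scatter (each visited air cell pushes +1 increments into its neighbors' slots of a mutated grid) by two staged passes: first build a 0/1 mask of visited-air cells, then form each output row as the elementwise sum of the mask row above, the mask row below, and the current mask row shifted left and right; correctness relies on the symmetry of the 4-neighbor relation.
import Mathlib
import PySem

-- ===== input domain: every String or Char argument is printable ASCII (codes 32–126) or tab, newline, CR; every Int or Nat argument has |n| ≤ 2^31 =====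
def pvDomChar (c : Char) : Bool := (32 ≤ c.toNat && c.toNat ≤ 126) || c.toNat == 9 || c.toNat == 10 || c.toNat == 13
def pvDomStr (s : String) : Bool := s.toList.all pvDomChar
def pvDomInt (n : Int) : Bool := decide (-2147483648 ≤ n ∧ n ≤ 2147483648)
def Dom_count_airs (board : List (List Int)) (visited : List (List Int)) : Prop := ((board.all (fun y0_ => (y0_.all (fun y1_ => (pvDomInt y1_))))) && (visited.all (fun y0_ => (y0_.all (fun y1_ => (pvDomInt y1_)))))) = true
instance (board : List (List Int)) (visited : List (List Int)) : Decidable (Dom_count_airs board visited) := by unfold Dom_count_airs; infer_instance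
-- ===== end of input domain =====

-- B replaces A's scatter (each visited air cell pushes +1 into a mutated counting grid at its
-- in-bounds neighbors) by two staged passes: build a 0/1 mask of visited-air cells, then form each
-- output row as the elementwise sum of the mask row above, the mask row below, and the current
-- mask row shifted left and right; objective: alternative (relies on neighbor symmetry).

-- module-level constants of the Python file
def pvDx : List Int := [0, 0, 1, -1]
def pvDy : List Int := [1, -1, 0, 0]

-- xs[i][j] for Nat indices (Python raises out of range; Pre_ confines us to in-range reads)
def pvGet2 (g : List (List Int)) (i j : Nat) : Int := (g.getD i []).getD j 0

-- ===== PORT A ===== (literal scatter: for each visited air cell, += 1 on each in-bounds neighbor)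
def count_airs (board : List (List Int)) (visited : List (List Int)) : List (List Int) :=
  let N := board.length
  let M := (board.headD []).length
  let init := List.replicate N (List.replicate M (0 : Int))
  (List.range N).foldl (fun g i =>
    (List.range M).foldl (fun g j =>
      if pvGet2 visited i j ≠ 0 ∧ pvGet2 board i j = 0 then
        (List.range 4).foldl (fun g k =>
          let nx : Int := (i : Int) + pvDx.getD k 0
          let ny : Int := (j : Int) + pvDy.getD k 0
          if nx < 0 ∨ (N : Int) ≤ nx ∨ ny < 0 ∨ (M : Int) ≤ ny then g
          else g.modify nx.toNat (fun row => row.modify ny.toNat (· + 1))) g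
      else g) g) init

-- ===== PORT B ===== (mask pass, then per-row sum of neighbor mask rows / shifted mask row)
def count_airs_alt (board : List (List Int)) (visited : List (List Int)) : List (List Int) :=
  let N := board.length
  let M := (board.headD []).length
  let mask := (List.range N).map (fun i => (List.range M).map (fun j =>
      if pvGet2 visited i j ≠ 0 ∧ pvGet2 board i j = 0 then (1 : Int) else 0))
  let zero := List.replicate M (0 : Int)
  (List.range N).map (fun i =>
    let up := if 0 < i then mask.getD (i - 1) [] else zero
    let down := if i + 1 < N then mask.getD (i + 1) [] else zero
    let cur := mask.getD i []
    let left := 0 :: cur.dropLast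
    let right := cur.drop 1 ++ [0]
    (List.range M).map (fun j => up.getD j 0 + down.getD j 0 + left.getD j 0 + right.getD j 0))

-- ===== PRECONDITION & SPEC =====
-- Pre_ holds exactly where Python A returns normally: board nonempty, visited at least N rows of
-- at least M entries (A reads visited[i][j] for every cell), and board[i] long enough wherever
-- visited[i][j] is truthy (the only positions A reads board at, by short-circuit).
def Pre_count_airs (board : List (List Int)) (visited : List (List Int)) : Prop :=
  board ≠ [] ∧
  board.length ≤ visited.length ∧
  (∀ i ∈ List.range board.length, (board.headD []).length ≤ (visited.getD i []).length) ∧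
  (∀ i ∈ List.range board.length, ∀ j ∈ List.range (board.headD []).length,
      pvGet2 visited i j ≠ 0 → j < (board.getD i []).length)
instance (board : List (List Int)) (visited : List (List Int)) : Decidable (Pre_count_airs board visited) := by unfold Pre_count_airs; infer_instance

def pvWitness_count_airs : List (List Int) × List (List Int) := ([[0, 1], [0, 0]], [[1, 0], [1, 1]])

def Spec_count_airs (board : List (List Int)) (visited : List (List Int)) (out : List (List Int)) : Prop := out = count_airs_alt board visited
instance (board : List (List Int)) (visited : List (List Int)) (out : List (List Int)) : Decidable (Spec_count_airs board visited out) := by unfold Spec_count_airs; infer_instance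

-- ===== CLAIM (what is proved, stated in full; the proofs are below) =====
def Claim_equal_count_airs : Prop := ∀ (board : List (List Int)) (visited : List (List Int)), Dom_count_airs board visited → Pre_count_airs board visited → Spec_count_airs board visited (count_airs board visited)

-- ===== LEMMAS AND PROOFS =====

-- one scatter increment, as a function of a position pair
def pvInc (g : List (List Int)) (p : Nat × Nat) : List (List Int) :=
  g.modify p.1 (fun row => row.modify p.2 (· + 1))

-- the in-bounds neighbors of (i, j) in the k = 0,1,2,3 order, assuming i < N and j < M
def pvTgts (N M i j : Nat) : List (Nat × Nat) :=
  (if j + 1 < M then [(i, j + 1)] else []) ++ (if 1 ≤ j then [(i, j - 1)] else []) ++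
  (if i + 1 < N then [(i + 1, j)] else []) ++ (if 1 ≤ i then [(i - 1, j)] else [])

-- "cell (i,j) is a visited air cell"
def pvOk (board visited : List (List Int)) (i j : Nat) : Bool :=
  pvGet2 visited i j != 0 && pvGet2 board i j == 0

-- the common pointwise value: number of in-bounds visited-air neighbors of (i,j)
def pvInd (board visited : List (List Int)) (N M i j : ℕ) : ℕ :=
  (if j + 1 < M ∧ pvOk board visited i (j + 1) then 1 else 0)
  + (if 1 ≤ j ∧ pvOk board visited i (j - 1) then 1 else 0)
  + (if i + 1 < N ∧ pvOk board visited (i + 1) j then 1 else 0)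
  + (if 1 ≤ i ∧ pvOk board visited (i - 1) j then 1 else 0)

lemma pv_foldl_foldl {α β γ : Type} (l : List β) (h : β → List γ) (f : α → γ → α) (init : α) :
    l.foldl (fun g i => (h i).foldl f g) init = (l.flatMap h).foldl f init := by
  induction l generalizing init with
  | nil => rfl
  | cons a l ih => simp [List.flatMap_cons, List.foldl_append, ih]

lemma pv_kloop_eq (board visited : List (List Int)) (N M i j : Nat) (hi : i < N) (hj : j < M)
    (g : List (List Int)) :
    (List.range 4).foldl (fun g k =>
        if (i : ℤ) + pvDx.getD k 0 < 0 ∨ (N : ℤ) ≤ (i : ℤ) + pvDx.getD k 0 ∨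
            (j : ℤ) + pvDy.getD k 0 < 0 ∨ (M : ℤ) ≤ (j : ℤ) + pvDy.getD k 0 then g
        else g.modify ((i : ℤ) + pvDx.getD k 0).toNat
          (fun row => row.modify ((j : ℤ) + pvDy.getD k 0).toNat (· + 1))) g
      = (pvTgts N M i j).foldl pvInc g := by
  have h4 : List.range 4 = [0, 1, 2, 3] := rfl
  have hstep : ∀ (c : Prop) (inst : Decidable c) (p : ℕ × ℕ) (g : List (List Int)),
      (if c then [p] else []).foldl pvInc g = if c then pvInc g p else g := by
    intro c inst p g; split <;> rfl
  have d0 : pvDx.getD 0 0 = 0 := rfl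
  have d1 : pvDx.getD 1 0 = 0 := rfl
  have d2 : pvDx.getD 2 0 = 1 := rfl
  have d3 : pvDx.getD 3 0 = -1 := rfl
  have e0 : pvDy.getD 0 0 = 1 := rfl
  have e1 : pvDy.getD 1 0 = -1 := rfl
  have e2 : pvDy.getD 2 0 = 0 := rfl
  have e3 : pvDy.getD 3 0 = 0 := rfl
  rw [h4, pvTgts]
  simp only [List.foldl_cons, List.foldl_nil, List.foldl_append, hstep,
    d0, d1, d2, d3, e0, e1, e2, e3]
  have s0 : ∀ g : List (List Int),
      (if (i : ℤ) + 0 < 0 ∨ (N : ℤ) ≤ (i : ℤ) + 0 ∨ (j : ℤ) + 1 < 0 ∨ (M : ℤ) ≤ (j : ℤ) + 1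
        then g
        else g.modify ((i : ℤ) + 0).toNat (fun row => row.modify ((j : ℤ) + 1).toNat (· + 1)))
      = if j + 1 < M then pvInc g (i, j + 1) else g := by
    intro g
    have t1 : ((i : ℤ) + 0).toNat = i := by omega
    have t2 : ((j : ℤ) + 1).toNat = j + 1 := by omega
    rw [t1, t2]
    by_cases hc : j + 1 < M
    · rw [if_pos hc, if_neg (by push_cast; omega)]; rfl
    · rw [if_neg hc, if_pos (by push_cast; omega)]
  have s1 : ∀ g : List (List Int),
      (if (i : ℤ) + 0 < 0 ∨ (N : ℤ) ≤ (i : ℤ) + 0 ∨ (j : ℤ) + -1 < 0 ∨ (M : ℤ) ≤ (j : ℤ) + -1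
        then g
        else g.modify ((i : ℤ) + 0).toNat (fun row => row.modify ((j : ℤ) + -1).toNat (· + 1)))
      = if 1 ≤ j then pvInc g (i, j - 1) else g := by
    intro g
    have t1 : ((i : ℤ) + 0).toNat = i := by omega
    have t2 : ((j : ℤ) + -1).toNat = j - 1 := by omega
    rw [t1, t2]
    by_cases hc : 1 ≤ j
    · rw [if_pos hc, if_neg (by push_cast; omega)]; rfl
    · rw [if_neg hc, if_pos (by push_cast; omega)]
  have s2 : ∀ g : List (List Int),
      (if (i : ℤ) + 1 < 0 ∨ (N : ℤ) ≤ (i : ℤ) + 1 ∨ (j : ℤ) + 0 < 0 ∨ (M : ℤ) ≤ (j : ℤ) + 0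
        then g
        else g.modify ((i : ℤ) + 1).toNat (fun row => row.modify ((j : ℤ) + 0).toNat (· + 1)))
      = if i + 1 < N then pvInc g (i + 1, j) else g := by
    intro g
    have t1 : ((i : ℤ) + 1).toNat = i + 1 := by omega
    have t2 : ((j : ℤ) + 0).toNat = j := by omega
    rw [t1, t2]
    by_cases hc : i + 1 < N
    · rw [if_pos hc, if_neg (by push_cast; omega)]; rfl
    · rw [if_neg hc, if_pos (by push_cast; omega)]
  have s3 : ∀ g : List (List Int),
      (if (i : ℤ) + -1 < 0 ∨ (N : ℤ) ≤ (i : ℤ) + -1 ∨ (j : ℤ) + 0 < 0 ∨ (M : ℤ) ≤ (j : ℤ) + 0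
        then g
        else g.modify ((i : ℤ) + -1).toNat (fun row => row.modify ((j : ℤ) + 0).toNat (· + 1)))
      = if 1 ≤ i then pvInc g (i - 1, j) else g := by
    intro g
    have t1 : ((i : ℤ) + -1).toNat = i - 1 := by omega
    have t2 : ((j : ℤ) + 0).toNat = j := by omega
    rw [t1, t2]
    by_cases hc : 1 ≤ i
    · rw [if_pos hc, if_neg (by push_cast; omega)]; rfl
    · rw [if_neg hc, if_pos (by push_cast; omega)]
  rw [s0, s1, s2, s3]

lemma pv_len_foldl_inc (L : List (Nat × Nat)) (g : List (List Int)) :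
    (L.foldl pvInc g).length = g.length := by
  induction L generalizing g with
  | nil => rfl
  | cons p L ih => simp [ih, pvInc, List.length_modify]

lemma pv_rowlen_inc (g : List (List Int)) (p : Nat × Nat) (x : Nat) :
    ((pvInc g p).getD x []).length = (g.getD x []).length := by
  simp only [pvInc, List.getD_eq_getElem?_getD, List.getElem?_modify]
  cases h : g[x]? with
  | none => simp
  | some r => simp only [Option.map_eq_map, Option.map_some, Option.getD_some]
              split <;> simp [List.length_modify]

lemma pv_rowlen_foldl_inc (L : List (Nat × Nat)) (g : List (List Int)) (x : Nat) :
    ((L.foldl pvInc g).getD x []).length = (g.getD x []).length := by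
  induction L generalizing g with
  | nil => rfl
  | cons p L ih => rw [List.foldl_cons, ih, pv_rowlen_inc]

lemma pv_get2_inc (g : List (List Int)) (p : Nat × Nat) (x y : Nat)
    (hx : x < g.length) (hy : y < (g.getD x []).length) :
    pvGet2 (pvInc g p) x y = pvGet2 g x y + (if p = (x, y) then 1 else 0) := by
  obtain ⟨a, b⟩ := p
  have hgx : g[x]? = some g[x] := List.getElem?_eq_getElem hx
  have hgd : g.getD x [] = g[x] := List.getD_eq_getElem g [] hx
  rw [hgd] at hy
  by_cases hax : a = x
  · subst hax
    have hry : g[a][y]? = some g[a][y] := List.getElem?_eq_getElem hy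
    by_cases hby : b = y
    · subst hby
      simp [pvGet2, pvInc, List.getD_eq_getElem?_getD, List.getElem?_modify, hgx, hry]
    · simp [pvGet2, pvInc, List.getD_eq_getElem?_getD, List.getElem?_modify, hgx, hby,
        Prod.mk.injEq]
  · simp [pvGet2, pvInc, List.getD_eq_getElem?_getD, List.getElem?_modify, hax, Prod.mk.injEq]

lemma pv_get2_foldl_count (L : List (Nat × Nat)) (g : List (List Int)) (x y : Nat)
    (hx : x < g.length) (hy : y < (g.getD x []).length) :
    pvGet2 (L.foldl pvInc g) x y = pvGet2 g x y + (L.count (x, y) : Int) := by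
  induction L generalizing g with
  | nil => simp
  | cons p L ih =>
      have hx' : x < (pvInc g p).length := by simpa [pvInc, List.length_modify] using hx
      have hy' : y < ((pvInc g p).getD x []).length := by rw [pv_rowlen_inc]; exact hy
      rw [List.foldl_cons, ih _ hx' hy', pv_get2_inc g p x y hx hy, List.count_cons]
      by_cases h : p = (x, y) <;> simp [h] <;> push_cast <;> ring

lemma pv_sum_map_range (f : ℕ → ℕ) (n : ℕ) :
    ((List.range n).map f).sum = ∑ i ∈ Finset.range n, f i := by
  induction n with
  | zero => simp
  | succ n ih => simp [List.range_succ, Finset.sum_range_succ, ih]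

lemma pv_collapse (N M x' y' : ℕ) (c : ℕ → ℕ → Prop) [∀ i j, Decidable (c i j)]
    (huniq : ∀ i j, c i j → i = x' ∧ j = y') :
    (∑ i ∈ Finset.range N, ∑ j ∈ Finset.range M, if c i j then (1 : ℕ) else 0)
      = if x' < N ∧ y' < M ∧ c x' y' then 1 else 0 := by
  have e1 : ∀ i j, (if c i j then (1 : ℕ) else 0)
      = if j = y' then (if i = x' ∧ c i j then 1 else 0) else 0 := by
    intro i j
    by_cases h : c i j
    · have := huniq i j h; simp [h, this.1, this.2]
    · simp [h]
  have e2 : ∀ i, (∑ j ∈ Finset.range M, if c i j then (1 : ℕ) else 0)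
      = if y' < M then (if i = x' ∧ c i y' then 1 else 0) else 0 := by
    intro i
    simp only [e1]
    rw [Finset.sum_ite_eq' (Finset.range M) y' (fun j => if i = x' ∧ c i j then 1 else 0)]
    simp [Finset.mem_range]
  simp only [e2]
  by_cases hy : y' < M
  · simp only [if_pos hy]
    have e3 : ∀ i, (if i = x' ∧ c i y' then (1 : ℕ) else 0)
        = if i = x' then (if c i y' then 1 else 0) else 0 := by
      intro i; by_cases h : i = x' <;> simp [h]
    simp only [e3]
    rw [Finset.sum_ite_eq' (Finset.range N) x' (fun i => if c i y' then 1 else 0)]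
    simp only [Finset.mem_range]
    by_cases h1 : x' < N <;> by_cases h2 : c x' y' <;> simp [h1, h2, hy]
  · simp only [if_neg hy, Finset.sum_const_zero]
    rw [if_neg (by tauto)]

lemma pv_count_tgts (N M i j x y : ℕ) :
    (pvTgts N M i j).count (x, y)
      = (if j + 1 < M ∧ i = x ∧ j + 1 = y then 1 else 0)
        + (if 1 ≤ j ∧ i = x ∧ j - 1 = y then 1 else 0)
        + (if i + 1 < N ∧ i + 1 = x ∧ j = y then 1 else 0)
        + (if 1 ≤ i ∧ i - 1 = x ∧ j = y then 1 else 0) := by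
  have step : ∀ (c : Prop) (inst : Decidable c) (a b : ℕ),
      (if c then [(a, b)] else []).count (x, y) = if c ∧ a = x ∧ b = y then 1 else 0 := by
    intro c inst a b
    by_cases h : c <;> simp [h, List.count_singleton, Prod.ext_iff] <;>
      split_ifs <;> simp_all [beq_iff_eq, Prod.ext_iff]
  rw [pvTgts]
  simp only [List.count_append, step]

-- the combinatorial heart: total number of scatter hits on (x,y) = the neighbor count at (x,y)
lemma pv_scatter_eq_gather (board visited : List (List Int)) (N M x y : ℕ)
    (hx : x < N) (hy : y < M) :
    (((List.range N).flatMap (fun i => (List.range M).flatMap (fun j =>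
        if pvOk board visited i j then pvTgts N M i j else []))).count (x, y) : ℕ)
      = pvInd board visited N M x y := by
  have hcf : ∀ (l : List ℕ) (f : ℕ → List (ℕ × ℕ)),
      (l.flatMap f).count (x, y) = (l.map (fun i => (f i).count (x, y))).sum := by
    intro l f
    simp [List.count_flatMap, Function.comp_def]
  rw [hcf, pv_sum_map_range]
  have inner : ∀ i,
      ((List.range M).flatMap (fun j =>
        if pvOk board visited i j then pvTgts N M i j else [])).count (x, y)
      = ∑ j ∈ Finset.range M,
          (if pvOk board visited i j then (pvTgts N M i j).count (x, y) else 0) := by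
    intro i
    rw [hcf, pv_sum_map_range]
    refine Finset.sum_congr rfl (fun j _ => ?_)
    by_cases h : pvOk board visited i j <;> simp [h]
  simp only [inner]
  have expand : ∀ i j,
      (if pvOk board visited i j then (pvTgts N M i j).count (x, y) else 0)
      = (if pvOk board visited i j = true ∧ (j + 1 < M ∧ i = x ∧ j + 1 = y) then 1 else 0)
        + (if pvOk board visited i j = true ∧ (1 ≤ j ∧ i = x ∧ j - 1 = y) then 1 else 0)
        + (if pvOk board visited i j = true ∧ (i + 1 < N ∧ i + 1 = x ∧ j = y) then 1 else 0)
        + (if pvOk board visited i j = true ∧ (1 ≤ i ∧ i - 1 = x ∧ j = y) then 1 else 0) := by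
    intro i j
    by_cases h : pvOk board visited i j = true
    · simp [h, pv_count_tgts N M i j x y]
    · simp [h]
  simp only [expand]
  simp only [Finset.sum_add_distrib]
  rw [pv_collapse N M x (y - 1)
      (fun i j => pvOk board visited i j = true ∧ (j + 1 < M ∧ i = x ∧ j + 1 = y))
      (fun i j h => ⟨h.2.2.1, by omega⟩),
    pv_collapse N M x (y + 1)
      (fun i j => pvOk board visited i j = true ∧ (1 ≤ j ∧ i = x ∧ j - 1 = y))
      (fun i j h => ⟨h.2.2.1, by omega⟩),
    pv_collapse N M (x - 1) y
      (fun i j => pvOk board visited i j = true ∧ (i + 1 < N ∧ i + 1 = x ∧ j = y))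
      (fun i j h => ⟨by omega, h.2.2.2⟩),
    pv_collapse N M (x + 1) y
      (fun i j => pvOk board visited i j = true ∧ (1 ≤ i ∧ i - 1 = x ∧ j = y))
      (fun i j h => ⟨by omega, h.2.2.2⟩)]
  have q0 : (if x < N ∧ y - 1 < M ∧ (pvOk board visited x (y - 1) = true ∧
        ((y - 1) + 1 < M ∧ x = x ∧ (y - 1) + 1 = y)) then (1 : ℕ) else 0)
      = if 1 ≤ y ∧ pvOk board visited x (y - 1) then 1 else 0 := by
    refine if_congr ?_ rfl rfl
    by_cases hb : pvOk board visited x (y - 1) = true <;> simp [hb] <;> omega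
  have q1 : (if x < N ∧ y + 1 < M ∧ (pvOk board visited x (y + 1) = true ∧
        (1 ≤ y + 1 ∧ x = x ∧ (y + 1) - 1 = y)) then (1 : ℕ) else 0)
      = if y + 1 < M ∧ pvOk board visited x (y + 1) then 1 else 0 := by
    refine if_congr ?_ rfl rfl
    by_cases hb : pvOk board visited x (y + 1) = true <;> simp [hb] <;> omega
  have q2 : (if x - 1 < N ∧ y < M ∧ (pvOk board visited (x - 1) y = true ∧
        ((x - 1) + 1 < N ∧ (x - 1) + 1 = x ∧ y = y)) then (1 : ℕ) else 0)
      = if 1 ≤ x ∧ pvOk board visited (x - 1) y then 1 else 0 := by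
    refine if_congr ?_ rfl rfl
    by_cases hb : pvOk board visited (x - 1) y = true <;> simp [hb] <;> omega
  have q3 : (if x + 1 < N ∧ y < M ∧ (pvOk board visited (x + 1) y = true ∧
        (1 ≤ x + 1 ∧ (x + 1) - 1 = x ∧ y = y)) then (1 : ℕ) else 0)
      = if x + 1 < N ∧ pvOk board visited (x + 1) y then 1 else 0 := by
    refine if_congr ?_ rfl rfl
    by_cases hb : pvOk board visited (x + 1) y = true <;> simp [hb] <;> omega
  rw [q0, q1, q2, q3]
  unfold pvInd
  ring

-- getD of a map over a range, in bounds
lemma pv_getD_map_range {α : Type} (f : ℕ → α) (n i : ℕ) (d : α) (h : i < n) :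
    ((List.range n).map f).getD i d = f i := by
  simp [List.getD_eq_getElem?_getD, List.getElem?_map, List.getElem?_range, h]

-- A's scatter loop computes the neighbor-count grid
lemma pv_main (board visited : List (List Int)) (N M : ℕ) :
    (List.range N).foldl (fun g i =>
      (List.range M).foldl (fun g j =>
        if pvGet2 visited i j ≠ 0 ∧ pvGet2 board i j = 0 then
          (List.range 4).foldl (fun g k =>
            if (i : ℤ) + pvDx.getD k 0 < 0 ∨ (N : ℤ) ≤ (i : ℤ) + pvDx.getD k 0 ∨
                (j : ℤ) + pvDy.getD k 0 < 0 ∨ (M : ℤ) ≤ (j : ℤ) + pvDy.getD k 0 then g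
            else g.modify ((i : ℤ) + pvDx.getD k 0).toNat
              (fun row => row.modify ((j : ℤ) + pvDy.getD k 0).toNat (· + 1))) g
        else g) g) (List.replicate N (List.replicate M (0 : Int)))
    = (List.range N).map (fun i => (List.range M).map (fun j =>
        (pvInd board visited N M i j : Int))) := by
  have hA : (List.range N).foldl (fun g i =>
      (List.range M).foldl (fun g j =>
        if pvGet2 visited i j ≠ 0 ∧ pvGet2 board i j = 0 then
          (List.range 4).foldl (fun g k =>
            if (i : ℤ) + pvDx.getD k 0 < 0 ∨ (N : ℤ) ≤ (i : ℤ) + pvDx.getD k 0 ∨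
                (j : ℤ) + pvDy.getD k 0 < 0 ∨ (M : ℤ) ≤ (j : ℤ) + pvDy.getD k 0 then g
            else g.modify ((i : ℤ) + pvDx.getD k 0).toNat
              (fun row => row.modify ((j : ℤ) + pvDy.getD k 0).toNat (· + 1))) g
        else g) g) (List.replicate N (List.replicate M (0 : Int)))
      = ((List.range N).flatMap (fun i => (List.range M).flatMap (fun j =>
          if pvOk board visited i j then pvTgts N M i j else []))).foldl pvInc
          (List.replicate N (List.replicate M (0 : Int))) := by
    rw [← pv_foldl_foldl]
    apply PySem.List.foldl_congr_mem
    intro g i hi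
    rw [← pv_foldl_foldl]
    apply PySem.List.foldl_congr_mem
    intro g' j hj
    rw [pv_kloop_eq board visited N M i j (List.mem_range.mp hi) (List.mem_range.mp hj) g']
    by_cases hok : pvGet2 visited i j ≠ 0 ∧ pvGet2 board i j = 0
    · rw [if_pos hok,
        if_pos (show pvOk board visited i j = true by
          simp only [pvOk, Bool.and_eq_true, bne_iff_ne, beq_iff_eq]; exact hok)]
    · rw [if_neg hok,
        if_neg (show ¬ (pvOk board visited i j = true) by
          simp only [pvOk, Bool.and_eq_true, bne_iff_ne, beq_iff_eq]; exact hok)]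
      rfl
  rw [hA]
  have hlenA : (((List.range N).flatMap (fun i => (List.range M).flatMap (fun j =>
      if pvOk board visited i j then pvTgts N M i j else []))).foldl pvInc
      (List.replicate N (List.replicate M (0 : Int)))).length = N := by
    rw [pv_len_foldl_inc]; simp
  apply List.ext_getElem
  · rw [hlenA]; simp
  · intro x hx1 hx2
    have hxN : x < N := by rwa [hlenA] at hx1
    have hrepl : (List.replicate N (List.replicate M (0 : Int))).getD x [] = List.replicate M (0 : Int) := by
      rw [List.getD_eq_getElem _ [] (by simpa using hxN), List.getElem_replicate]
    have hrowlen : ((((List.range N).flatMap (fun i => (List.range M).flatMap (fun j =>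
        if pvOk board visited i j then pvTgts N M i j else []))).foldl pvInc
        (List.replicate N (List.replicate M (0 : Int)))).getD x []).length = M := by
      rw [pv_rowlen_foldl_inc, hrepl]; simp
    have hrowA : (((List.range N).flatMap (fun i => (List.range M).flatMap (fun j =>
        if pvOk board visited i j then pvTgts N M i j else []))).foldl pvInc
        (List.replicate N (List.replicate M (0 : Int))))[x]
        = (((List.range N).flatMap (fun i => (List.range M).flatMap (fun j =>
        if pvOk board visited i j then pvTgts N M i j else []))).foldl pvInc
        (List.replicate N (List.replicate M (0 : Int)))).getD x [] :=
      (List.getD_eq_getElem _ [] hx1).symm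
    apply List.ext_getElem
    · rw [hrowA, hrowlen]
      simp [hxN]
    · intro y hy1 hy2
      have hyM : y < M := by rw [hrowA, hrowlen] at hy1; exact hy1
      have hxlen : x < (List.replicate N (List.replicate M (0 : Int))).length := by
        simpa using hxN
      have hylen : y < ((List.replicate N (List.replicate M (0 : Int))).getD x []).length := by
        rw [hrepl]; simpa using hyM
      have init0 : pvGet2 (List.replicate N (List.replicate M (0 : Int))) x y = 0 := by
        unfold pvGet2
        rw [hrepl, List.getD_eq_getElem _ 0 (by simpa using hyM), List.getElem_replicate]
      have hcount := pv_get2_foldl_count ((List.range N).flatMap (fun i =>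
        (List.range M).flatMap (fun j =>
          if pvOk board visited i j then pvTgts N M i j else [])))
        (List.replicate N (List.replicate M (0 : Int))) x y hxlen hylen
      have hAe : (((List.range N).flatMap (fun i => (List.range M).flatMap (fun j =>
          if pvOk board visited i j then pvTgts N M i j else []))).foldl pvInc
          (List.replicate N (List.replicate M (0 : Int))))[x][y]
          = pvGet2 (((List.range N).flatMap (fun i => (List.range M).flatMap (fun j =>
          if pvOk board visited i j then pvTgts N M i j else []))).foldl pvInc
          (List.replicate N (List.replicate M (0 : Int)))) x y := by
        unfold pvGet2
        rw [List.getD_eq_getElem _ [] hx1, List.getD_eq_getElem _ 0 hy1]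
      refine hAe.trans ?_
      rw [hcount, init0, zero_add,
        pv_scatter_eq_gather board visited N M x y hxN hyM]
      simp [hxN, hyM]

-- B's mask-and-shift construction computes the same neighbor-count grid
lemma pv_alt (board visited : List (List Int)) :
    count_airs_alt board visited
      = (List.range board.length).map (fun i =>
          (List.range (board.headD []).length).map (fun j =>
            (pvInd board visited board.length (board.headD []).length i j : Int))) := by
  set N := board.length with hN
  set M := (board.headD []).length with hM
  simp only [count_airs_alt]
  apply List.map_congr_left
  intro i hi
  have hiN : i < N := List.mem_range.mp hi
  apply List.map_congr_left
  intro j hj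
  have hjM : j < M := List.mem_range.mp hj
  set g : ℕ → ℕ → Int := fun a b =>
    if pvGet2 visited a b ≠ 0 ∧ pvGet2 board a b = 0 then (1 : Int) else 0 with hg
  have hmaskrow : ∀ a, a < N →
      ((List.range N).map (fun a => (List.range M).map (g a))).getD a []
        = (List.range M).map (g a) := fun a ha => pv_getD_map_range _ N a [] ha
  have hcell : ∀ a b, a < N → b < M → ((List.range M).map (g a)).getD b 0 = g a b :=
    fun a b _ hb => pv_getD_map_range _ M b 0 hb
  have hgok : ∀ a b, g a b = ((if pvOk board visited a b then 1 else 0 : ℕ) : Int) := by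
    intro a b
    simp only [hg, pvOk, Bool.and_eq_true, bne_iff_ne, beq_iff_eq]
    split_ifs <;> simp_all
  -- the four summands
  have hup : (if 0 < i then ((List.range N).map (fun a => (List.range M).map (g a))).getD (i - 1) []
        else List.replicate M (0 : Int)).getD j 0
      = ((if 1 ≤ i ∧ pvOk board visited (i - 1) j then 1 else 0 : ℕ) : Int) := by
    by_cases h : 0 < i
    · rw [if_pos h, hmaskrow (i - 1) (by omega), hcell _ _ (by omega) hjM, hgok]
      by_cases hb : pvOk board visited (i - 1) j = true <;>
        simp [hb, show 1 ≤ i from h]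
    · rw [if_neg h]
      have : ¬ (1 ≤ i ∧ pvOk board visited (i - 1) j = true) := by
        intro hc; exact h hc.1
      rw [if_neg this]
      simp [List.getD_eq_getElem?_getD, List.getElem?_replicate, hjM]
  have hdown : (if i + 1 < N then ((List.range N).map (fun a => (List.range M).map (g a))).getD (i + 1) []
        else List.replicate M (0 : Int)).getD j 0
      = ((if i + 1 < N ∧ pvOk board visited (i + 1) j then 1 else 0 : ℕ) : Int) := by
    by_cases h : i + 1 < N
    · rw [if_pos h, hmaskrow (i + 1) h, hcell _ _ h hjM, hgok]
      by_cases hb : pvOk board visited (i + 1) j = true <;> simp [hb, h]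
    · rw [if_neg h, if_neg (by tauto)]
      simp [List.getD_eq_getElem?_getD, List.getElem?_replicate, hjM]
  have hcur : ((List.range N).map (fun a => (List.range M).map (g a))).getD i []
      = (List.range M).map (g i) := hmaskrow i hiN
  have hcurlen : ((List.range M).map (g i)).length = M := by simp
  have hleft : (0 :: (((List.range N).map (fun a => (List.range M).map (g a))).getD i []).dropLast).getD j 0
      = ((if 1 ≤ j ∧ pvOk board visited i (j - 1) then 1 else 0 : ℕ) : Int) := by
    rw [hcur]
    cases j with
    | zero => simp
    | succ k =>
        have hkM : k < M - 1 := by omega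
        have : ((0 : Int) :: ((List.range M).map (g i)).dropLast).getD (k + 1) 0
            = (((List.range M).map (g i)).dropLast).getD k 0 := by
          simp [List.getD_eq_getElem?_getD]
        rw [this]
        have hdrop : (((List.range M).map (g i)).dropLast).getD k 0
            = ((List.range M).map (g i)).getD k 0 := by
          simp only [List.getD_eq_getElem?_getD, List.getElem?_dropLast]
          rw [if_pos (by rw [hcurlen]; omega)]
        rw [hdrop, hcell _ _ hiN (by omega), hgok]
        by_cases hb : pvOk board visited i k = true <;>
          simp [hb, show (1:ℕ) ≤ k + 1 by omega, Nat.add_sub_cancel]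
  have hright : ((((List.range N).map (fun a => (List.range M).map (g a))).getD i []).drop 1 ++ [0]).getD j 0
      = ((if j + 1 < M ∧ pvOk board visited i (j + 1) then 1 else 0 : ℕ) : Int) := by
    rw [hcur]
    have hdlen : (((List.range M).map (g i)).drop 1).length = M - 1 := by
      simp [hcurlen]
    by_cases h : j + 1 < M
    · have hj' : j < (((List.range M).map (g i)).drop 1).length := by rw [hdlen]; omega
      have : ((((List.range M).map (g i)).drop 1) ++ [(0 : Int)]).getD j 0
          = (((List.range M).map (g i)).drop 1).getD j 0 := by
        simp only [List.getD_eq_getElem?_getD]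
        rw [List.getElem?_append_left hj']
      rw [this]
      have : (((List.range M).map (g i)).drop 1).getD j 0
          = ((List.range M).map (g i)).getD (1 + j) 0 := by
        simp [List.getD_eq_getElem?_getD, List.getElem?_drop, Nat.add_comm]
      rw [this, show 1 + j = j + 1 by omega, hcell _ _ hiN h, hgok]
      by_cases hb : pvOk board visited i (j + 1) = true <;> simp [hb, h]
    · have hj' : ¬ j < (((List.range M).map (g i)).drop 1).length := by rw [hdlen]; omega
      have : ((((List.range M).map (g i)).drop 1) ++ [(0 : Int)]).getD j 0 = 0 := by
        simp only [List.getD_eq_getElem?_getD]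
        rw [List.getElem?_append_right (by omega)]
        have : j - (((List.range M).map (g i)).drop 1).length = 0 := by
          rw [hdlen]; omega
        rw [this]
        simp
      rw [this, if_neg (by tauto)]
      simp
  rw [hup, hdown, hleft, hright]
  unfold pvInd
  push_cast
  ring

-- ===== VERDICT (by name: the statement is the Claim_ definition above) =====
theorem count_airs_spec : Claim_equal_count_airs := by
  intro board visited _ _
  show count_airs board visited = count_airs_alt board visited
  rw [pv_alt]
  simp only [count_airs]
  exact pv_main board visited board.length (board.headD []).length
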